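-- pv_equiv track=rewrite | github.com/Wizc1998/realization-of-SON-Algorithm-using-the-Spark-Framework | task1.py | sort_itemset_inside_out
-- ===== SOURCE A (Python) =====
-- from itertools import groupby
--
-- def sort_tuple(k_tup):
--     result = list(k_tup)
--     result.sort()
--     return tuple(result)
--
-- def sort_itemset_inside_out(itemset):
--
--     new_itemset = []
--     for item in itemset:
--         new_itemset.append(sort_tuple(item))
--
--     itemset = new_itemset
--
--     zz = [list(g) for k, g in groupby(itemset, key=len)]
--
--     new_itemset = []
--     for bucket in zz:
--         bucket.sort()
--         new_itemset = new_itemset+bucket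
--
--     return new_itemset
-- ===== SOURCE B (Python) =====
-- def sort_itemset_inside_out(itemset):
--     decorated = []
--     run = -1
--     prev = None
--     for item in itemset:
--         t = tuple(sorted(item))
--         if len(t) != prev:
--             run += 1
--             prev = len(t)
--         decorated.append((run, t))
--     decorated.sort()
--     return [t for _, t in decorated]
-- ===== Notes on version B (the rewrite author's own statement) =====
-- stated objective: alternative
-- what changed: Replaced A's groupby-into-buckets-then-sort-each-bucket pipeline by decorate-sort-undecorate: each inside-sorted tuple is tagged with a run id that increments when the length changes, the tagged list is sorted once globally (run id first, tuple second), and the tags are stripped; no groupby, no intermediate list-of-lists and no per-bucket sorts.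
import Mathlib
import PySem

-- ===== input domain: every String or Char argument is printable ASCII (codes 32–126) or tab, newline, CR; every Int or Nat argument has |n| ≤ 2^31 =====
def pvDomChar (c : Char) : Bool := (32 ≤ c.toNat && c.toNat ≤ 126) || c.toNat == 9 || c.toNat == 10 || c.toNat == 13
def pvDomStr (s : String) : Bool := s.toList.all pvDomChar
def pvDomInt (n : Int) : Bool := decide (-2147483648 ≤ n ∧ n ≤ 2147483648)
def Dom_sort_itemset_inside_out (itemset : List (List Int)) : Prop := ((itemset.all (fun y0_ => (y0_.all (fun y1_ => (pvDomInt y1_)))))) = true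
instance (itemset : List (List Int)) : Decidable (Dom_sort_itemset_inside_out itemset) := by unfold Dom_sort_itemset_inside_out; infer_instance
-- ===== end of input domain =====

-- B replaces A's groupby-into-buckets-then-sort-each-bucket pipeline by decorate-sort-undecorate:
-- tag each inside-sorted tuple with a length-run id, ONE global sort of the tagged pairs, strip the
-- tags (objective: alternative — same cost, different algorithm).

-- ===== PORT A =====
-- sort_tuple(k_tup): list, in-place sort, tuple
def pvSortTuple (k_tup : List Int) : List Int :=
  PySem.List.sorted k_tup (fun x => x) false

-- [list(g) for k, g in groupby(itemset, key=len)] — consecutive runs of equal length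
def pvGroupByLen : List (List Int) → List (List (List Int))
  | [] => []
  | x :: xs =>
    let p := xs.span (fun y => y.length == x.length)
    (x :: p.1) :: pvGroupByLen p.2
  termination_by l => l.length
  decreasing_by
    simp only [List.span_eq_takeWhile_dropWhile]
    have := List.length_dropWhile_le (p := fun y => y.length == x.length) (l := xs)
    simpa using Nat.lt_succ_of_le this

def sort_itemset_inside_out (itemset : List (List Int)) : List (List Int) :=
  -- first loop: new_itemset.append(sort_tuple(item))
  let new_itemset := itemset.foldl (fun acc item => acc ++ [pvSortTuple item]) []
  let zz := pvGroupByLen new_itemset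
  -- second loop: bucket.sort(); new_itemset = new_itemset + bucket
  zz.foldl (fun acc bucket => acc ++ PySem.List.sorted bucket (fun x => x) false) []

-- ===== PORT B =====
-- loop body: t = tuple(sorted(item)); if len(t) != prev: run += 1; prev = len(t); decorated.append((run, t))
-- state = (run, prev, decorated)
def pvDecStep (s : Int × Option Nat × List (Int × List Int)) (item : List Int) :
    Int × Option Nat × List (Int × List Int) :=
  let t := PySem.List.sorted item (fun x => x) false
  if some t.length = s.2.1 then
    (s.1, s.2.1, s.2.2 ++ [(s.1, t)])
  else
    (s.1 + 1, some t.length, s.2.2 ++ [(s.1 + 1, t)])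

def sort_itemset_inside_out_alt (itemset : List (List Int)) : List (List Int) :=
  let s := itemset.foldl pvDecStep (-1, none, [])
  -- decorated.sort(): pairs compare lexicographically (run id, then tuple)
  (PySem.List.sorted2 s.2.2 Prod.fst Prod.snd false).map Prod.snd

-- ===== PRECONDITION & SPEC =====
def Spec_sort_itemset_inside_out (itemset : List (List Int)) (out : List (List Int)) : Prop := out = sort_itemset_inside_out_alt itemset
instance (itemset : List (List Int)) (out : List (List Int)) : Decidable (Spec_sort_itemset_inside_out itemset out) := by unfold Spec_sort_itemset_inside_out; infer_instance

-- ===== CLAIM (what is proved, stated in full; the proofs are below) =====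
def Claim_equal_sort_itemset_inside_out : Prop := ∀ (itemset : List (List Int)), Dom_sort_itemset_inside_out itemset → Spec_sort_itemset_inside_out itemset (sort_itemset_inside_out itemset)

-- ===== LEMMAS AND PROOFS =====

-- shorthand used only by the proofs
def pvSortL (xs : List (List Int)) : List (List Int) := PySem.List.sorted xs (fun x => x) false

-- the lexicographic pair comparison sorted2 sorts by
def pvLt (a b : Int × List Int) : Bool :=
  decide (a.1 < b.1) || (!decide (b.1 < a.1) && decide (a.2 < b.2))

-- groups gs tagged with consecutive run ids starting at r
def pvDecorate (r : Int) : List (List (List Int)) → List (Int × List Int)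
  | [] => []
  | g :: gs => g.map (fun t => (r, t)) ++ pvDecorate (r + 1) gs

theorem pvSortTuple_length (y : List Int) : (pvSortTuple y).length = y.length :=
  PySem.List.length_sorted y (fun x => x) false

theorem pvSorted2_eq_foldl (xs : List (Int × List Int)) :
    PySem.List.sorted2 xs Prod.fst Prod.snd false
      = xs.foldl (fun acc x => PySem.List.insertBy pvLt x acc) [] := rfl

theorem pvMem_decorate_fst_ge (gs : List (List (List Int))) : ∀ (r : Int) (p : Int × List Int),
    p ∈ pvDecorate r gs → r ≤ p.1 := by
  induction gs with
  | nil => intro r p h; simp [pvDecorate] at h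
  | cons g gs ih =>
    intro r p h
    rcases List.mem_append.mp h with h | h
    · rcases List.mem_map.mp h with ⟨t, _, rfl⟩; simp
    · exact le_trans (by omega) (ih (r + 1) p h)

theorem pvInsertBy_append_left (before : Int × List Int → Int × List Int → Bool)
    (x : Int × List Int) (as bs : List (Int × List Int))
    (h : ∀ y ∈ as, before x y = false) :
    PySem.List.insertBy before x (as ++ bs) = as ++ PySem.List.insertBy before x bs := by
  induction as with
  | nil => rfl
  | cons a as ih =>
    have h1 := h a (by simp)
    simp only [List.cons_append, PySem.List.insertBy, h1, Bool.false_eq_true, if_false]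
    rw [ih (fun y hy => h y (by simp [hy]))]

theorem pvInsertBy_map_fst (r : Int) (t : List Int) (b : List (List Int)) :
    PySem.List.insertBy pvLt (r, t) (b.map (fun u => (r, u)))
      = (PySem.List.insertBy (fun a c => decide (a < c)) t b).map (fun u => (r, u)) := by
  induction b with
  | nil => rfl
  | cons u b ih =>
    simp only [List.map_cons, PySem.List.insertBy, pvLt]
    by_cases htu : t < u
    · simp [htu]
    · simp [htu, ih]

theorem pvFoldl_insert_block (r : Int) (g : List (List Int)) : ∀ (b : List (List Int)),
    g.foldl (fun acc t => PySem.List.insertBy pvLt (r, t) acc) (b.map (fun u => (r, u)))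
      = (g.foldl (fun acc t => PySem.List.insertBy (fun a c => decide (a < c)) t acc) b).map
          (fun u => (r, u)) := by
  induction g with
  | nil => intro b; rfl
  | cons t g ih =>
    intro b
    simp only [List.foldl_cons]
    rw [pvInsertBy_map_fst r t b, ih]

theorem pvFoldl_insert_sep (xs : List (Int × List Int)) : ∀ (as bs : List (Int × List Int)),
    (∀ x ∈ xs, ∀ y ∈ as, pvLt x y = false) →
    xs.foldl (fun acc x => PySem.List.insertBy pvLt x acc) (as ++ bs)
      = as ++ xs.foldl (fun acc x => PySem.List.insertBy pvLt x acc) bs := by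
  induction xs with
  | nil => intro as bs _; rfl
  | cons x xs ih =>
    intro as bs h
    simp only [List.foldl_cons]
    rw [pvInsertBy_append_left pvLt x as bs (h x (by simp)),
      ih as _ (fun z hz y hy => h z (by simp [hz]) y hy)]

-- the global sort of the tagged groups, untagged, is A's per-group sort concatenation
theorem pvSorted2_decorate (gs : List (List (List Int))) : ∀ (r : Int),
    (PySem.List.sorted2 (pvDecorate r gs) Prod.fst Prod.snd false).map Prod.snd
      = gs.flatMap pvSortL := by
  induction gs with
  | nil => intro r; rfl
  | cons g gs ih =>
    intro r
    have hblock : (g.map (fun t => ((r : Int), t))).foldl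
        (fun acc x => PySem.List.insertBy pvLt x acc) []
        = (pvSortL g).map (fun u => (r, u)) := by
      rw [List.foldl_map]
      have := pvFoldl_insert_block r g []
      simp only [List.map_nil] at this
      rw [this, pvSortL, PySem.List.sorted_eq_foldl_insertBy]
    have hsep : ∀ x ∈ pvDecorate (r + 1) gs, ∀ y ∈ (pvSortL g).map (fun u => (r, u)),
        pvLt x y = false := by
      intro x hx y hy
      rcases List.mem_map.mp hy with ⟨u, _, rfl⟩
      have hr1 : r + 1 ≤ x.1 := pvMem_decorate_fst_ge gs (r + 1) x hx
      simp [pvLt, show ¬ (x.1 < r) by omega, show r < x.1 by omega]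
    calc (PySem.List.sorted2 (pvDecorate r (g :: gs)) Prod.fst Prod.snd false).map Prod.snd
        = ((pvDecorate (r + 1) gs).foldl (fun acc x => PySem.List.insertBy pvLt x acc)
            ((pvSortL g).map (fun u => (r, u)) ++ [])).map Prod.snd := by
          rw [pvSorted2_eq_foldl]
          show ((g.map (fun t => ((r : Int), t)) ++ pvDecorate (r + 1) gs).foldl
              (fun acc x => PySem.List.insertBy pvLt x acc) []).map Prod.snd = _
          rw [List.foldl_append, hblock, List.append_nil]
      _ = pvSortL g ++ gs.flatMap pvSortL := by
          rw [pvFoldl_insert_sep (pvDecorate (r + 1) gs) _ [] hsep, List.map_append,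
            ← pvSorted2_eq_foldl, ih (r + 1), List.map_map]
          simp
      _ = (g :: gs).flatMap pvSortL := by simp

-- B's loop over a run of equal lengths only appends (run, t) pairs
theorem pvDec_run (g : List (List Int)) : ∀ (run : Int) (L : Nat) (dec : List (Int × List Int)),
    (∀ y ∈ g, y.length = L) →
    g.foldl pvDecStep (run, some L, dec)
      = (run, some L, dec ++ (g.map pvSortTuple).map (fun t => (run, t))) := by
  induction g with
  | nil => intro run L dec _; simp
  | cons y ys ih =>
    intro run L dec h
    have hstep : pvDecStep (run, some L, dec) y = (run, some L, dec ++ [(run, pvSortTuple y)]) := by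
      simp [pvDecStep, pvSortTuple, h y (by simp)]
    rw [List.foldl_cons, hstep, ih run L _ (fun z hz => h z (by simp [hz]))]
    simp

-- B's full loop produces exactly the run-id tagging of A's consecutive length groups
theorem pvDec_main (ys : List (List Int)) : ∀ (run : Int) (prev : Option Nat)
    (dec : List (Int × List Int)),
    (∀ h, ys.head? = some h → prev ≠ some (pvSortTuple h).length) →
    (ys.foldl pvDecStep (run, prev, dec)).2.2
      = dec ++ pvDecorate (run + 1) (pvGroupByLen (ys.map pvSortTuple)) := by
  induction ys using pvGroupByLen.induct with
  | case1 => intro run prev dec _; simp [pvGroupByLen, pvDecorate]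
  | case2 x xs p ih =>
    intro run prev dec hr
    have hp : p = xs.span (fun y => y.length == x.length) := rfl
    have hstep : pvDecStep (run, prev, dec) x
        = (run + 1, some (pvSortTuple x).length, dec ++ [(run + 1, pvSortTuple x)]) := by
      simp only [pvDecStep]
      rw [if_neg (fun h => hr x rfl h.symm)]
      rfl
    have hspan : (xs.map pvSortTuple).span (fun y => y.length == (pvSortTuple x).length)
        = (p.1.map pvSortTuple, p.2.map pvSortTuple) := by
      rw [List.span_eq_takeWhile_dropWhile, List.takeWhile_map, List.dropWhile_map]
      have hc : ((fun y : List Int => y.length == (pvSortTuple x).length) ∘ pvSortTuple)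
          = (fun y : List Int => y.length == x.length) := by
        funext y; simp [Function.comp, pvSortTuple_length]
      rw [hc, hp, List.span_eq_takeWhile_dropWhile]
    have hgroup : pvGroupByLen ((x :: xs).map pvSortTuple)
        = (pvSortTuple x :: p.1.map pvSortTuple) :: pvGroupByLen (p.2.map pvSortTuple) := by
      rw [List.map_cons, pvGroupByLen, hspan]
    have hxs : xs = p.1 ++ p.2 := by
      rw [hp, List.span_eq_takeWhile_dropWhile]
      exact (List.takeWhile_append_dropWhile).symm
    have hrun : ∀ y ∈ p.1, y.length = x.length := by
      intro y hy
      rw [hp, List.span_eq_takeWhile_dropWhile] at hy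
      simpa using List.mem_takeWhile_imp hy
    have hhead : ∀ h, p.2.head? = some h
        → (some x.length : Option Nat) ≠ some ((pvSortTuple h).length) := by
      intro h hh hc
      have hd := List.head?_dropWhile_not (fun y : List Int => y.length == x.length) xs
      rw [show xs.dropWhile (fun y : List Int => y.length == x.length) = p.2 from by
        rw [hp, List.span_eq_takeWhile_dropWhile], hh] at hd
      rw [pvSortTuple_length] at hc
      simp [← Option.some_inj.mp hc] at hd
    calc ((x :: xs).foldl pvDecStep (run, prev, dec)).2.2
        = (p.2.foldl pvDecStep (run + 1, some x.length,
            (dec ++ [(run + 1, pvSortTuple x)])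
              ++ (p.1.map pvSortTuple).map (fun t => (run + 1, t)))).2.2 := by
          rw [List.foldl_cons, hstep, pvSortTuple_length x, hxs, List.foldl_append,
            pvDec_run p.1 (run + 1) x.length _ hrun]
      _ = dec ++ pvDecorate (run + 1) (pvGroupByLen ((x :: xs).map pvSortTuple)) := by
          rw [ih (run + 1) (some x.length) _ hhead, hgroup]
          simp [pvDecorate, List.append_assoc]

-- ===== VERDICT (by name: the statement is the Claim_ definition above) =====
theorem sort_itemset_inside_out_spec : Claim_equal_sort_itemset_inside_out := by
  intro itemset _
  show sort_itemset_inside_out itemset = sort_itemset_inside_out_alt itemset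
  have hA : sort_itemset_inside_out itemset
      = (pvGroupByLen (itemset.foldl (fun acc item => acc ++ [pvSortTuple item]) [])).foldl
          (fun acc bucket => acc ++ PySem.List.sorted bucket (fun x => x) false) [] := rfl
  have hB : sort_itemset_inside_out_alt itemset
      = (PySem.List.sorted2 ((itemset.foldl pvDecStep (-1, none, [])).2.2)
          Prod.fst Prod.snd false).map Prod.snd := rfl
  rw [hA, hB, PySem.List.foldl_append_singleton_eq_map pvSortTuple itemset [],
    PySem.List.foldl_append_eq_flatMap
      (fun bucket => PySem.List.sorted bucket (fun x => x) false)
      (pvGroupByLen ([] ++ itemset.map pvSortTuple)) [],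
    pvDec_main itemset (-1) none [] (by intro h _ hc; cases hc)]
  simp only [List.nil_append, show (-1 : Int) + 1 = 0 from by norm_num]
  rw [pvSorted2_decorate _ 0]
  rfl
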